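-- pv_equiv track=rewrite | github.com/etblink/Nested-Fibrational-Cosmology | witness_v3.py | cycle_rank
-- ===== SOURCE A (Python) =====
-- def adjacency(graph, n):
--     adj = {v: set() for v in range(n)}
--     for e in graph:
--         u, v = list(e)
--         adj[u].add(v)
--         adj[v].add(u)
--     return adj
--
-- def cycle_rank(graph, n):
--     adj = adjacency(graph, n)
--     visited = set(); components = 0
--     for v in range(n):
--         if v not in visited:
--             components += 1
--             stack = [v]
--             while stack:
--                 u = stack.pop()
--                 if u in visited: continue
--                 visited.add(u)
--                 for w in adj[u]:
--                     if w not in visited: stack.append(w)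
--     return len(graph) - n + components
-- ===== SOURCE B (Python) =====
-- def cycle_rank(graph, n):
--     # merge label classes edge by edge instead of DFS over an adjacency structure
--     label = {v: v for v in range(n)}
--     components = len(label)
--     for e in graph:
--         u, v = list(e)
--         lu, lv = label[u], label[v]
--         if lu != lv:
--             keep, drop = (lu, lv) if lu < lv else (lv, lu)
--             label = {w: (keep if lw == drop else lw) for w, lw in label.items()}
--             components -= 1
--     return len(graph) - n + components
-- ===== Notes on version B (the rewrite author's own statement) =====
-- stated objective: alternative
-- what changed: Replaces the adjacency-dict + explicit-stack DFS component count with edge-by-edge merging of component labels (a relabelling union of classes), keeping a running component counter decremented on each effective merge; no adjacency structure, no stack, no visited set.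
import Mathlib
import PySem

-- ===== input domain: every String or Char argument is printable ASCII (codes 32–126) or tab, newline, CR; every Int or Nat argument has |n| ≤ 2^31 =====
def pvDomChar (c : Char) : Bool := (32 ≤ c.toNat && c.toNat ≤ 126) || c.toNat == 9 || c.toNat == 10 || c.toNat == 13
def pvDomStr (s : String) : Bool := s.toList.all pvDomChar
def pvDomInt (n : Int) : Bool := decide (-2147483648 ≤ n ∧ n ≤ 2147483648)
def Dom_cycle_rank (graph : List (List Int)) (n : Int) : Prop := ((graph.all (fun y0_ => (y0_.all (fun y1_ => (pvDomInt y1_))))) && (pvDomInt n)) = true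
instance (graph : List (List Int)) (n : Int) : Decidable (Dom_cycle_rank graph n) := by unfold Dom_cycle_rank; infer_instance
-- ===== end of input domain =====

-- B replaces the DFS component count by edge-by-edge merging of component labels (alternative algorithm, not faster).
-- Ports return 0 where the Python raises (those inputs are excluded by Pre_cycle_rank).

-- ===== PORT A =====
-- adj = {v: set() for v in range(n)}; for e in graph: u, v = list(e); adj[u].add(v); adj[v].add(u)
-- (none = a KeyError on a vertex outside range(n) or a ValueError from unpacking a non-pair)
def adjInit (n : Int) : PySem.Dict Int (PySem.Set Int) :=
  (PySem.List.pyRange 0 n 1).foldl (fun d v => d.insert v PySem.Set.empty) PySem.Dict.empty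

def adjStep (acc : Option (PySem.Dict Int (PySem.Set Int))) (e : List Int) :
    Option (PySem.Dict Int (PySem.Set Int)) :=
  match acc with
  | none => none
  | some adj =>
    match e with
    | [u, v] =>
      match adj.get? u with
      | none => none
      | some su =>
        match (adj.insert u (PySem.Set.add su v)).get? v with
        | none => none
        | some sv => some ((adj.insert u (PySem.Set.add su v)).insert v (PySem.Set.add sv u))
    | _ => none

def adjacency (graph : List (List Int)) (n : Int) : Option (PySem.Dict Int (PySem.Set Int)) :=
  graph.foldl adjStep (some (adjInit n))

-- countP strictly drops when one element flips from the counted side (used by dfsLoop's termination)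
theorem pvCountP_lt {α : Type} (l : List α) (p q : α → Bool)
    (h : ∀ x ∈ l, q x = true → p x = true) (u : α) (hu : u ∈ l)
    (hp : p u = true) (hq : q u = false) : l.countP q < l.countP p := by
  induction l with
  | nil => cases hu
  | cons a l ih =>
    simp only [List.countP_cons]
    have hmono : l.countP q ≤ l.countP p :=
      List.countP_mono_left (fun x hx => h x (List.mem_cons_of_mem a hx))
    rcases List.mem_cons.mp hu with rfl | hu'
    · simp [hp, hq]
      exact hmono
    · have := ih (fun x hx => h x (List.mem_cons_of_mem a hx)) hu'
      have hqa : q a = true → p a = true := h a (List.mem_cons_self ..)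
      cases hqp : q a <;> cases hpp : p a <;> simp_all <;> omega

-- the inner `while stack:` loop; the stack's top is the list head; neighbours of a popped
-- vertex are pushed in the set's stored order (the final visited SET does not depend on it)
def dfsLoop (adj : PySem.Dict Int (PySem.Set Int)) (stack : List Int)
    (visited : PySem.Set Int) : Option (PySem.Set Int) :=
  match stack with
  | [] => some visited
  | u :: rest =>
    if PySem.Set.contains visited u then dfsLoop adj rest visited
    else
      match hg : adj.get? u with
      | none => none
      | some nbrs =>
        let visited' := PySem.Set.add visited u
        let stack' := nbrs.foldl (fun st w => if PySem.Set.contains visited' w then st else w :: st) rest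
        dfsLoop adj stack' visited'
  termination_by ((adj.keys.countP (fun k => !(PySem.Set.contains visited k))), stack.length)
  decreasing_by
    · exact Prod.Lex.right _ (Nat.lt_succ_self _)
    · apply Prod.Lex.left
      have hne : ¬ PySem.Set.contains visited u = true := ‹¬ PySem.Set.contains visited u = true›
      have hmem : u ∈ adj.keys := by
        have hc : adj.contains u = true := by
          rw [PySem.Dict.contains_eq_isSome_get?, hg]; rfl
        exact (PySem.Dict.contains_iff_mem_keys adj u).mp hc
      refine pvCountP_lt _ _ _ ?_ u hmem ?_ ?_
      · intro x _hx hqx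
        have hx' : ¬ x ∈ PySem.Set.add visited u := by
          simpa [PySem.Set.contains_iff] using hqx
        simp only [Bool.not_eq_eq_eq_not, Bool.not_true, ← Bool.not_eq_true,
          PySem.Set.contains_iff]
        exact fun hxv => hx' ((PySem.Set.mem_add _ _ _).mpr (Or.inl hxv))
      · simp only [Bool.not_eq_eq_eq_not, Bool.not_true, ← Bool.not_eq_true,
          PySem.Set.contains_iff]
        simpa using hne
      · simp [PySem.Set.mem_add]

def visitStep (adj : PySem.Dict Int (PySem.Set Int))
    (acc : Option (PySem.Set Int × Int)) (v : Int) : Option (PySem.Set Int × Int) :=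
  match acc with
  | none => none
  | some (visited, components) =>
    if PySem.Set.contains visited v then some (visited, components)
    else
      match dfsLoop adj [v] visited with
      | none => none
      | some visited' => some (visited', components + 1)

def cycle_rank (graph : List (List Int)) (n : Int) : Int :=
  match adjacency graph n with
  | none => 0
  | some adj =>
    match (PySem.List.pyRange 0 n 1).foldl (visitStep adj) (some (PySem.Set.empty, (0 : Int))) with
    | none => 0
    | some (_, components) => (graph.length : Int) - n + components

-- ===== PORT B =====
-- label = {v: v for v in range(n)}; for each edge merge the two label classes by
-- relabelling (dict comprehension over label.items(); keys are distinct and kept in order)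
def labelInit (n : Int) : PySem.Dict Int Int :=
  (PySem.List.pyRange 0 n 1).foldl (fun d v => d.insert v v) PySem.Dict.empty

def mergeStep (acc : Option (PySem.Dict Int Int × Int)) (e : List Int) :
    Option (PySem.Dict Int Int × Int) :=
  match acc with
  | none => none
  | some (label, components) =>
    match e with
    | [u, v] =>
      match label.get? u, label.get? v with
      | some lu, some lv =>
        if lu ≠ lv then
          let keep := if lu < lv then lu else lv
          let drop := if lu < lv then lv else lu
          some (PySem.Dict.mk ((PySem.Dict.items label).map
                  (fun p => (p.1, if p.2 = drop then keep else p.2))), components - 1)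
        else some (label, components)
      | _, _ => none
    | _ => none

def cycle_rank_alt (graph : List (List Int)) (n : Int) : Int :=
  match graph.foldl mergeStep (some (labelInit n, (PySem.Dict.size (labelInit n) : Int))) with
  | none => 0
  | some (_, components) => (graph.length : Int) - n + components

-- ===== PRECONDITION & SPEC =====
-- Pre_ = exactly the inputs where A raises nothing: every edge is a 2-element sequence
-- whose endpoints lie in range(n) (otherwise `u, v = list(e)` raises ValueError or the
-- adjacency/label lookup raises KeyError, in both A and B).
def Pre_cycle_rank (graph : List (List Int)) (n : Int) : Prop :=
  ∀ e ∈ graph, e.length = 2 ∧ ∀ x ∈ e, 0 ≤ x ∧ x < n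
instance (graph : List (List Int)) (n : Int) : Decidable (Pre_cycle_rank graph n) := by
  unfold Pre_cycle_rank; infer_instance

def pvWitness_cycle_rank : List (List Int) × Int := ([[0, 1], [1, 2], [0, 2], [3, 3]], 5)

def Spec_cycle_rank (graph : List (List Int)) (n : Int) (out : Int) : Prop := out = cycle_rank_alt graph n
instance (graph : List (List Int)) (n : Int) (out : Int) : Decidable (Spec_cycle_rank graph n out) := by unfold Spec_cycle_rank; infer_instance

-- ===== CLAIM (what is proved, stated in full; the proofs are below) =====
def Claim_equal_cycle_rank : Prop := ∀ (graph : List (List Int)) (n : Int), Dom_cycle_rank graph n → Pre_cycle_rank graph n → Spec_cycle_rank graph n (cycle_rank graph n)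

-- ===== LEMMAS AND PROOFS =====

-- x is a vertex: 0 <= x < n
def pvInR (n x : Int) : Prop := 0 ≤ x ∧ x < n

-- the (symmetric) edge-step relation of an edge list, and connectivity = its refl-trans closure
def pvES (es : List (List Int)) (a b : Int) : Prop := [a, b] ∈ es ∨ [b, a] ∈ es

def pvConn (es : List (List Int)) : Int → Int → Prop := Relation.ReflTransGen (pvES es)

-- first-occurrence predicate w.r.t. a labelling L (Bool, so it can be counted)
def pvFirst (L : Int → Int) (a : Int) : Bool :=
  decide (∀ w ∈ PySem.List.pyRange 0 a 1, L w ≠ L a)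

theorem pvES_symm {es : List (List Int)} {a b : Int} (h : pvES es a b) : pvES es b a :=
  h.elim Or.inr Or.inl

theorem pvConn_symm {es : List (List Int)} : Symmetric (pvConn es) :=
  Relation.ReflTransGen.symmetric (fun _ _ h => pvES_symm h)

theorem pvConn_nil {a b : Int} (h : pvConn [] a b) : a = b := by
  induction h with
  | refl => rfl
  | tail _ hstep ih => cases hstep with
    | inl h' => cases h'
    | inr h' => cases h'

theorem pvES_mono {es es' : List (List Int)} {a b : Int} (h : pvES es a b) :
    pvES (es ++ es') a b := by
  cases h with
  | inl h' => exact Or.inl (List.mem_append_left _ h')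
  | inr h' => exact Or.inr (List.mem_append_left _ h')

theorem pvConn_mono {es es' : List (List Int)} {a b : Int} (h : pvConn es a b) :
    pvConn (es ++ es') a b :=
  Relation.ReflTransGen.mono (fun _ _ hs => pvES_mono hs) h

theorem pvES_append_edge {es : List (List Int)} {u v a b : Int} :
    pvES (es ++ [[u, v]]) a b ↔ pvES es a b ∨ (a = u ∧ b = v) ∨ (a = v ∧ b = u) := by
  simp only [pvES, List.mem_append, List.mem_singleton, List.cons.injEq, and_true]
  tauto

-- under Pre_, every edge is a pair of in-range vertices
theorem pvPreShape {graph : List (List Int)} {n : Int} (hpre : Pre_cycle_rank graph n) :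
    ∀ e ∈ graph, ∃ u v, e = [u, v] ∧ pvInR n u ∧ pvInR n v := by
  intro e he
  obtain ⟨hlen, hbnd⟩ := hpre e he
  obtain ⟨u, v, rfl⟩ := List.length_eq_two.mp hlen
  exact ⟨u, v, rfl, hbnd u (by simp), hbnd v (by simp)⟩

-- endpoints of an edge step lie in range, under Pre_
theorem pvES_range {graph : List (List Int)} {n a b : Int}
    (hpre : Pre_cycle_rank graph n) (h : pvES graph a b) :
    pvInR n a ∧ pvInR n b := by
  cases h with
  | inl h' =>
    obtain ⟨-, hb⟩ := hpre _ h'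
    exact ⟨hb a (by simp), hb b (by simp)⟩
  | inr h' =>
    obtain ⟨-, hb⟩ := hpre _ h'
    exact ⟨hb a (by simp), hb b (by simp)⟩

-- adding one edge [u,v] to the edge list: connectivity decomposes
theorem pvConn_append_edge {es : List (List Int)} {u v a b : Int} :
    pvConn (es ++ [[u, v]]) a b ↔
      pvConn es a b ∨ (pvConn es a u ∧ pvConn es v b) ∨ (pvConn es a v ∧ pvConn es u b) := by
  constructor
  · intro h
    induction h with
    | refl => exact Or.inl .refl
    | @tail b c _ hbc ih =>
      have hbc' : pvES es b c ∨ (b = u ∧ c = v) ∨ (b = v ∧ c = u) := by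
        cases hbc with
        | inl h' =>
          rcases List.mem_append.mp h' with h'' | h''
          · exact Or.inl (Or.inl h'')
          · simp only [List.mem_singleton, List.cons.injEq, and_true] at h''
            exact Or.inr (Or.inl ⟨h''.1, h''.2⟩)
        | inr h' =>
          rcases List.mem_append.mp h' with h'' | h''
          · exact Or.inl (Or.inr h'')
          · simp only [List.mem_singleton, List.cons.injEq, and_true] at h''
            exact Or.inr (Or.inr ⟨h''.2, h''.1⟩)
      rcases ih with h1 | ⟨h1, h2⟩ | ⟨h1, h2⟩ <;>
        rcases hbc' with hs | ⟨rfl, rfl⟩ | ⟨rfl, rfl⟩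
      · exact Or.inl (h1.tail hs)
      · exact Or.inr (Or.inl ⟨h1, .refl⟩)
      · exact Or.inr (Or.inr ⟨h1, .refl⟩)
      · exact Or.inr (Or.inl ⟨h1, h2.tail hs⟩)
      · exact Or.inl (h1.trans (pvConn_symm h2))
      · exact Or.inl h1
      · exact Or.inr (Or.inr ⟨h1, h2.tail hs⟩)
      · exact Or.inl h1
      · exact Or.inl (h1.trans (pvConn_symm h2))
  · intro h
    have he : pvES (es ++ [[u, v]]) u v := Or.inl (by simp)
    rcases h with h | ⟨h1, h2⟩ | ⟨h1, h2⟩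
    · exact pvConn_mono h
    · exact ((pvConn_mono h1).tail he).trans (pvConn_mono h2)
    · exact ((pvConn_mono h1).tail (pvES_symm he)).trans (pvConn_mono h2)

-- merging two distinct present values of a list drops its number of distinct values by one
theorem pvDedupMerge (l : List Int) (k d : Int) (hk : k ∈ l) (hd : d ∈ l) (hkd : k ≠ d) :
    (PySem.Set.ofList (l.map (fun x => if x = d then k else x))).length + 1 =
      (PySem.Set.ofList l).length := by
  have hnod1 : (PySem.Set.ofList (l.map (fun x => if x = d then k else x))).Nodup :=
    PySem.Set.nodup_ofList _
  have hnod2 : ((PySem.Set.ofList l).erase d).Nodup := (PySem.Set.nodup_ofList l).erase d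
  have hmem : ∀ y, y ∈ PySem.Set.ofList (l.map (fun x => if x = d then k else x)) ↔
      y ∈ (PySem.Set.ofList l).erase d := by
    intro y
    rw [PySem.Set.mem_ofList, (PySem.Set.nodup_ofList l).mem_erase_iff, PySem.Set.mem_ofList]
    constructor
    · intro hy
      obtain ⟨x, hx, hxy⟩ := List.mem_map.mp hy
      by_cases hxd : x = d
      · subst hxd
        simp only [if_pos] at hxy
        subst hxy
        exact ⟨hkd, hk⟩
      · simp only [if_neg hxd] at hxy
        subst hxy
        exact ⟨hxd, hx⟩
    · rintro ⟨hyd, hyl⟩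
      exact List.mem_map.mpr ⟨y, hyl, if_neg hyd⟩
  have hperm := (List.perm_ext_iff_of_nodup hnod1 hnod2).mpr hmem
  have hdof : d ∈ PySem.Set.ofList l := (PySem.Set.mem_ofList l d).mpr hd
  rw [hperm.length_eq, List.length_erase_of_mem hdof]
  have : 0 < (PySem.Set.ofList l).length := List.length_pos_of_mem hdof
  omega

-- number of distinct values of L on [0, v) = number of first occurrences
theorem pvDedupCount (L : Int → Int) (v : Int) (hv : 0 ≤ v) :
    ((PySem.Set.ofList ((PySem.List.pyRange 0 v 1).map L)).length : Int) =
      ((PySem.List.pyRange 0 v 1).countP (pvFirst L) : Int) := by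
  induction v, hv using Int.le_induction with
  | base => simp [PySem.List.pyRange_one_eq_nil (le_refl (0 : Int))]
  | succ v hv ih =>
    rw [PySem.List.pyRange_one_succ_right hv, List.map_append, List.countP_append]
    simp only [List.map_cons, List.map_nil, PySem.Set.ofList_append_singleton,
      List.countP_cons, List.countP_nil]
    rw [PySem.Set.add_eq_ite]
    by_cases hmem : L v ∈ PySem.Set.ofList ((PySem.List.pyRange 0 v 1).map L)
    · have hfirst : pvFirst L v = false := by
        rw [PySem.Set.mem_ofList, List.mem_map] at hmem
        obtain ⟨w, hw, hwv⟩ := hmem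
        simp only [pvFirst, decide_eq_false_iff_not, not_forall]
        exact ⟨w, hw, not_not.mpr hwv⟩
      rw [if_pos hmem, hfirst]
      simpa using ih
    · have hfirst : pvFirst L v = true := by
        simp only [pvFirst, decide_eq_true_eq]
        intro w hw hwv
        exact hmem ((PySem.Set.mem_ofList _ _).mpr (List.mem_map.mpr ⟨w, hw, hwv⟩))
      rw [if_neg hmem, hfirst, List.length_append]
      simp only [List.length_singleton]
      push_cast
      omega

-- ===== B-side invariant =====
def pvBInv (n : Int) (es : List (List Int)) (st : PySem.Dict Int Int × Int) : Prop :=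
  st.1.keys = PySem.List.pyRange 0 n 1 ∧
  (∀ a b : Int, pvInR n a → pvInR n b →
    (st.1.getD a 0 = st.1.getD b 0 ↔ pvConn es a b)) ∧
  st.2 = ((PySem.Set.ofList ((PySem.List.pyRange 0 n 1).map (fun a => st.1.getD a 0))).length : Int)

-- contains → get? returns the getD value
theorem pvGet?_getD {κ ν : Type} [BEq κ] [LawfulBEq κ] (d : PySem.Dict κ ν) (k : κ) (d0 : ν)
    (h : d.contains k = true) : d.get? k = some (d.getD k d0) := by
  rw [PySem.Dict.contains_eq_isSome_get?] at h
  cases hg : d.get? k with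
  | none => rw [hg] at h; simp at h
  | some x => rw [PySem.Dict.getD_eq_get?_getD, hg]; rfl

theorem pvLabel0_items (n : Int) :
    (labelInit n).items = (PySem.List.pyRange 0 n 1).map (fun v => (v, v)) := by
  unfold labelInit
  rw [PySem.Dict.items_foldl_insert_fresh (PySem.List.pyRange 0 n 1) (fun v => v) (fun v => v)
      PySem.Dict.empty (fun a _ => PySem.Dict.contains_empty a)
      (by simpa using PySem.List.nodup_pyRange_one 0 n)]
  rfl

theorem pvBInv_init (n : Int) :
    pvBInv n [] (labelInit n, (PySem.Dict.size (labelInit n) : Int)) := by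
  have hitems := pvLabel0_items n
  have hkeys : (labelInit n).keys = PySem.List.pyRange 0 n 1 := by
    simp only [PySem.Dict.keys, hitems, List.map_map]
    have hc : ((fun x : Int × Int => x.1) ∘ fun v : Int => (v, v)) = id := rfl
    rw [hc, List.map_id]
  have hnod : (labelInit n).keys.Nodup := by
    rw [hkeys]; exact PySem.List.nodup_pyRange_one 0 n
  have hgetD : ∀ a : Int, pvInR n a → (labelInit n).getD a 0 = a := by
    intro a ha
    have hmem : (a, a) ∈ (labelInit n).items := by
      rw [hitems]
      exact List.mem_map.mpr ⟨a, PySem.List.mem_pyRange_one.mpr ⟨ha.1, ha.2⟩, rfl⟩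
    exact PySem.Dict.getD_of_mem_items _ hmem hnod 0
  refine ⟨hkeys, ?_, ?_⟩
  · intro a b ha hb
    rw [hgetD a ha, hgetD b hb]
    constructor
    · intro h; rw [h]; exact Relation.ReflTransGen.refl
    · intro h; exact pvConn_nil h
  · have hmap : (PySem.List.pyRange 0 n 1).map (fun a => (labelInit n).getD a 0) =
        PySem.List.pyRange 0 n 1 := by
      rw [List.map_congr_left (fun a ha => hgetD a
        (by rcases PySem.List.mem_pyRange_one.mp ha with ⟨h1, h2⟩; exact ⟨h1, h2⟩))]
      exact List.map_id _
    rw [hmap, PySem.Set.ofList_eq_self_of_nodup _ (PySem.List.nodup_pyRange_one 0 n)]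
    simp [PySem.Dict.size, hitems, List.length_map]

theorem pvBStep_inv {n : Int} {pre : List (List Int)} {st : PySem.Dict Int Int × Int}
    {u v : Int} (hu : pvInR n u) (hv : pvInR n v) (hinv : pvBInv n pre st) :
    ∃ st', mergeStep (some st) [u, v] = some st' ∧ pvBInv n (pre ++ [[u, v]]) st' := by
  obtain ⟨label, comps⟩ := st
  obtain ⟨hkeys, hc, hcomp⟩ := hinv
  dsimp only at hkeys hc hcomp
  have hnod : label.keys.Nodup := by rw [hkeys]; exact PySem.List.nodup_pyRange_one 0 n
  have hcontains : ∀ a : Int, pvInR n a → label.contains a = true := fun a ha =>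
    (PySem.Dict.contains_iff_mem_keys label a).mpr
      (by rw [hkeys]; exact PySem.List.mem_pyRange_one.mpr ⟨ha.1, ha.2⟩)
  have hgu : label.get? u = some (label.getD u 0) := pvGet?_getD _ _ _ (hcontains u hu)
  have hgv : label.get? v = some (label.getD v 0) := pvGet?_getD _ _ _ (hcontains v hv)
  by_cases heq : label.getD u 0 = label.getD v 0
  · refine ⟨(label, comps), ?_, ?_, ?_, ?_⟩
    · simp only [mergeStep, hgu, hgv]
      rw [if_neg (not_not_intro heq)]
    · exact hkeys
    · intro a b ha hb
      rw [pvConn_append_edge]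
      have huv : pvConn pre u v := (hc u v hu hv).mp heq
      constructor
      · intro h; exact Or.inl ((hc a b ha hb).mp h)
      · intro h
        apply (hc a b ha hb).mpr
        rcases h with h | ⟨h1, h2⟩ | ⟨h1, h2⟩
        · exact h
        · exact (h1.trans huv).trans h2
        · exact (h1.trans (pvConn_symm huv)).trans h2
    · exact hcomp
  · refine ⟨(PySem.Dict.mk ((PySem.Dict.items label).map
        (fun p => (p.1, if p.2 = (if label.getD u 0 < label.getD v 0 then label.getD v 0
                                  else label.getD u 0)
                        then (if label.getD u 0 < label.getD v 0 then label.getD u 0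
                              else label.getD v 0)
                        else p.2))), comps - 1), ?_, ?_⟩
    · simp only [mergeStep, hgu, hgv]
      rw [if_pos heq]
    set lu := label.getD u 0 with hlu
    set lv := label.getD v 0 with hlv
    set K : Int := if lu < lv then lu else lv with hK
    set D : Int := if lu < lv then lv else lu with hD
    have hKD : K ≠ D := by
      rw [hK, hD]; split_ifs
      · exact heq
      · exact Ne.symm heq
    have hcases : (K = lu ∧ D = lv) ∨ (K = lv ∧ D = lu) := by
      rw [hK, hD]; split_ifs <;> simp
    set newlabel := PySem.Dict.mk ((PySem.Dict.items label).map
        (fun p => (p.1, if p.2 = D then K else p.2))) with hnew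
    have hitems' : newlabel.items = (PySem.Dict.items label).map
        (fun p => (p.1, if p.2 = D then K else p.2)) := rfl
    have hkeys' : newlabel.keys = PySem.List.pyRange 0 n 1 := by
      simp only [PySem.Dict.keys, hitems', List.map_map]
      have hfst : ((fun x : Int × Int => x.1) ∘
          (fun p : Int × Int => (p.1, if p.2 = D then K else p.2))) = (fun x : Int × Int => x.1) := rfl
      rw [hfst]
      exact hkeys
    have hnod' : newlabel.keys.Nodup := by
      rw [hkeys']; exact PySem.List.nodup_pyRange_one 0 n
    have hgetD' : ∀ a : Int, pvInR n a →
        newlabel.getD a 0 = (if label.getD a 0 = D then K else label.getD a 0) := by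
      intro a ha
      have hmm : (a, label.getD a 0) ∈ label.items :=
        PySem.Dict.mem_items_of_get?_eq_some _ (pvGet?_getD _ _ 0 (hcontains a ha))
      have hmm' : (a, if label.getD a 0 = D then K else label.getD a 0) ∈ newlabel.items := by
        rw [hitems']
        exact List.mem_map.mpr ⟨(a, label.getD a 0), hmm, rfl⟩
      exact PySem.Dict.getD_of_mem_items _ hmm' hnod' 0
    refine ⟨hkeys', ?_, ?_⟩
    · intro a b ha hb
      rw [hgetD' a ha, hgetD' b hb, pvConn_append_edge]
      have hg : ((if label.getD a 0 = D then K else label.getD a 0) =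
                 (if label.getD b 0 = D then K else label.getD b 0)) ↔
          (label.getD a 0 = label.getD b 0 ∨
           (label.getD a 0 = D ∧ label.getD b 0 = K) ∨
           (label.getD a 0 = K ∧ label.getD b 0 = D)) := by
        split_ifs <;> omega
      rw [hg]
      have hab := hc a b ha hb
      have hau := hc a u ha hu
      rw [← hlu] at hau
      have hav := hc a v ha hv
      rw [← hlv] at hav
      have hbu := hc b u hb hu
      rw [← hlu] at hbu
      have hbv := hc b v hb hv
      rw [← hlv] at hbv
      rcases hcases with ⟨hKe, hDe⟩ | ⟨hKe, hDe⟩ <;> rw [hKe, hDe] <;>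
        constructor <;> intro hcase
      · rcases hcase with h | ⟨h1, h2⟩ | ⟨h1, h2⟩
        · exact Or.inl (hab.mp h)
        · exact Or.inr (Or.inr ⟨hav.mp h1, pvConn_symm (hbu.mp h2)⟩)
        · exact Or.inr (Or.inl ⟨hau.mp h1, pvConn_symm (hbv.mp h2)⟩)
      · rcases hcase with h | ⟨h1, h2⟩ | ⟨h1, h2⟩
        · exact Or.inl (hab.mpr h)
        · exact Or.inr (Or.inr ⟨hau.mpr h1, hbv.mpr (pvConn_symm h2)⟩)
        · exact Or.inr (Or.inl ⟨hav.mpr h1, hbu.mpr (pvConn_symm h2)⟩)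
      · rcases hcase with h | ⟨h1, h2⟩ | ⟨h1, h2⟩
        · exact Or.inl (hab.mp h)
        · exact Or.inr (Or.inl ⟨hau.mp h1, pvConn_symm (hbv.mp h2)⟩)
        · exact Or.inr (Or.inr ⟨hav.mp h1, pvConn_symm (hbu.mp h2)⟩)
      · rcases hcase with h | ⟨h1, h2⟩ | ⟨h1, h2⟩
        · exact Or.inl (hab.mpr h)
        · exact Or.inr (Or.inl ⟨hau.mpr h1, hbv.mpr (pvConn_symm h2)⟩)
        · exact Or.inr (Or.inr ⟨hav.mpr h1, hbu.mpr (pvConn_symm h2)⟩)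
    · have hmap' : ((PySem.List.pyRange 0 n 1).map fun a => newlabel.getD a 0) =
          ((PySem.List.pyRange 0 n 1).map fun a => label.getD a 0).map
            (fun x => if x = D then K else x) := by
        rw [List.map_map]
        exact List.map_congr_left (fun a ha => hgetD' a
          (by rcases PySem.List.mem_pyRange_one.mp ha with ⟨h1, h2⟩; exact ⟨h1, h2⟩))
      have hKin : K ∈ (PySem.List.pyRange 0 n 1).map fun a => label.getD a 0 := by
        rcases hcases with ⟨hKe, -⟩ | ⟨hKe, -⟩
        · exact hKe ▸ List.mem_map.mpr ⟨u, PySem.List.mem_pyRange_one.mpr ⟨hu.1, hu.2⟩, rfl⟩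
        · exact hKe ▸ List.mem_map.mpr ⟨v, PySem.List.mem_pyRange_one.mpr ⟨hv.1, hv.2⟩, rfl⟩
      have hDin : D ∈ (PySem.List.pyRange 0 n 1).map fun a => label.getD a 0 := by
        rcases hcases with ⟨-, hDe⟩ | ⟨-, hDe⟩
        · exact hDe ▸ List.mem_map.mpr ⟨v, PySem.List.mem_pyRange_one.mpr ⟨hv.1, hv.2⟩, rfl⟩
        · exact hDe ▸ List.mem_map.mpr ⟨u, PySem.List.mem_pyRange_one.mpr ⟨hu.1, hu.2⟩, rfl⟩
      have hmerge := pvDedupMerge _ K D hKin hDin hKD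
      rw [hmap']
      omega

theorem pvBFold {n : Int} (es : List (List Int))
    (hes : ∀ e ∈ es, ∃ u v, e = [u, v] ∧ pvInR n u ∧ pvInR n v) :
    ∀ (pre : List (List Int)) (st : PySem.Dict Int Int × Int), pvBInv n pre st →
    ∃ st', es.foldl mergeStep (some st) = some st' ∧ pvBInv n (pre ++ es) st' := by
  induction es with
  | nil => exact fun pre st h => ⟨st, rfl, by simpa using h⟩
  | cons e rest ih =>
    intro pre st h
    obtain ⟨u, v, rfl, hu, hv⟩ := hes e (List.mem_cons_self ..)
    obtain ⟨st1, hstep, hinv1⟩ := pvBStep_inv hu hv h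
    obtain ⟨st', hfold, hinv'⟩ := ih (fun e he => hes e (List.mem_cons_of_mem _ he))
      (pre ++ [[u, v]]) st1 hinv1
    refine ⟨st', ?_, ?_⟩
    · rw [List.foldl_cons, hstep]; exact hfold
    · simpa [List.append_assoc] using hinv'

-- ===== A-side: adjacency =====
def pvAdjInv (n : Int) (es : List (List Int))
    (adj : PySem.Dict Int (PySem.Set Int)) : Prop :=
  (∀ x : Int, adj.contains x = true ↔ pvInR n x) ∧
  (∀ a b : Int, b ∈ adj.getD a PySem.Set.empty ↔ pvES es a b)

theorem pvAdjInit_inv (n : Int) : pvAdjInv n [] (adjInit n) := by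
  have hkeys : (adjInit n).keys = PySem.List.pyRange 0 n 1 := by
    unfold adjInit
    rw [PySem.Dict.keys_foldl_insert _ (fun _ _ => PySem.Set.empty), PySem.Dict.keys_empty,
      PySem.Set.update_nil_left,
      PySem.Set.ofList_eq_self_of_nodup _ (PySem.List.nodup_pyRange_one 0 n)]
  constructor
  · intro x
    rw [PySem.Dict.contains_iff_mem_keys, hkeys, PySem.List.mem_pyRange_one]
    exact ⟨fun h => ⟨h.1, h.2⟩, fun h => ⟨h.1, h.2⟩⟩
  · intro a b
    have hgd : (adjInit n).getD a PySem.Set.empty = PySem.Set.empty := by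
      by_cases hmem : (adjInit n).contains a = true
      · have hnod : (adjInit n).keys.Nodup := by
          rw [hkeys]; exact PySem.List.nodup_pyRange_one 0 n
        have hit : (adjInit n).items =
            (PySem.List.pyRange 0 n 1).map (fun v => (v, PySem.Set.empty)) := by
          unfold adjInit
          rw [PySem.Dict.items_foldl_insert_fresh (PySem.List.pyRange 0 n 1) (fun v => v)
            (fun _ => PySem.Set.empty) PySem.Dict.empty (fun a _ => PySem.Dict.contains_empty a)
            (by simpa using PySem.List.nodup_pyRange_one 0 n)]
          rfl
        have hmm : (a, (PySem.Set.empty : PySem.Set Int)) ∈ (adjInit n).items := by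
          rw [hit]
          refine List.mem_map.mpr ⟨a, ?_, rfl⟩
          rw [PySem.Dict.contains_iff_mem_keys, hkeys] at hmem
          exact hmem
        exact PySem.Dict.getD_of_mem_items _ hmm hnod _
      · exact PySem.Dict.getD_of_not_contains _ _ (by simpa using hmem)
    rw [hgd]
    simp [pvES, PySem.Set.empty]

theorem pvAdjStep_inv {n : Int} {es : List (List Int)} {u v : Int}
    {adj : PySem.Dict Int (PySem.Set Int)} (hu : pvInR n u) (hv : pvInR n v)
    (h : pvAdjInv n es adj) :
    ∃ adj', adjStep (some adj) [u, v] = some adj' ∧ pvAdjInv n (es ++ [[u, v]]) adj' := by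
  obtain ⟨hcont, hmem⟩ := h
  have hgu : adj.get? u = some (adj.getD u PySem.Set.empty) :=
    pvGet?_getD _ _ _ ((hcont u).mpr hu)
  have hcont2 : ∀ x : Int,
      (adj.insert u (PySem.Set.add (adj.getD u PySem.Set.empty) v)).contains x = true ↔
        pvInR n x := by
    intro x
    rw [PySem.Dict.contains_insert]
    simp only [Bool.or_eq_true, beq_iff_eq]
    constructor
    · rintro (rfl | hx)
      · exact hu
      · exact (hcont x).mp hx
    · intro hx
      exact Or.inr ((hcont x).mpr hx)
  have hgv2 : (adj.insert u (PySem.Set.add (adj.getD u PySem.Set.empty) v)).get? v =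
      some ((adj.insert u (PySem.Set.add (adj.getD u PySem.Set.empty) v)).getD v
        PySem.Set.empty) :=
    pvGet?_getD _ _ _ ((hcont2 v).mpr hv)
  refine ⟨(adj.insert u ((adj.getD u PySem.Set.empty).add v)).insert v
      (((adj.insert u ((adj.getD u PySem.Set.empty).add v)).getD v PySem.Set.empty).add u),
      ?_, ?_, ?_⟩
  · simp only [adjStep, hgu, hgv2]
  · intro x
    rw [PySem.Dict.contains_insert]
    simp only [Bool.or_eq_true, beq_iff_eq]
    constructor
    · rintro (rfl | hx)
      · exact hv
      · exact (hcont2 x).mp hx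
    · intro hx
      exact Or.inr ((hcont2 x).mpr hx)
  · intro a b
    rw [pvES_append_edge]
    rw [PySem.Dict.getD_insert, PySem.Dict.getD_insert, PySem.Dict.getD_insert]
    by_cases hav : a = v
    · rw [if_pos hav]
      by_cases hvu : v = u
      · rw [if_pos hvu]
        rw [PySem.Set.mem_add, PySem.Set.mem_add, hmem]
        subst hav; subst hvu
        tauto
      · rw [if_neg hvu]
        rw [PySem.Set.mem_add, hmem]
        subst hav
        tauto
    · rw [if_neg hav]
      by_cases hau : a = u
      · rw [if_pos hau]
        rw [PySem.Set.mem_add, hmem]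
        subst hau
        tauto
      · rw [if_neg hau, hmem]
        constructor
        · exact fun h => Or.inl h
        · rintro (h | ⟨rfl, rfl⟩ | ⟨rfl, rfl⟩)
          · exact h
          · exact (hau rfl).elim
          · exact (hav rfl).elim

theorem pvAdjFold {n : Int} (es : List (List Int))
    (hes : ∀ e ∈ es, ∃ u v, e = [u, v] ∧ pvInR n u ∧ pvInR n v) :
    ∀ (pre : List (List Int)) (adj : PySem.Dict Int (PySem.Set Int)), pvAdjInv n pre adj →
    ∃ adj', es.foldl adjStep (some adj) = some adj' ∧ pvAdjInv n (pre ++ es) adj' := by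
  induction es with
  | nil => exact fun pre adj h => ⟨adj, rfl, by simpa using h⟩
  | cons e rest ih =>
    intro pre adj h
    obtain ⟨u, v, rfl, hu, hv⟩ := hes e (List.mem_cons_self ..)
    obtain ⟨adj1, hstep, hinv1⟩ := pvAdjStep_inv hu hv h
    obtain ⟨adj', hfold, hinv'⟩ := ih (fun e he => hes e (List.mem_cons_of_mem _ he))
      (pre ++ [[u, v]]) adj1 hinv1
    refine ⟨adj', ?_, ?_⟩
    · rw [List.foldl_cons, hstep]; exact hfold
    · simpa [List.append_assoc] using hinv'

theorem pvAdjacency {graph : List (List Int)} {n : Int} (hpre : Pre_cycle_rank graph n) :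
    ∃ adj, adjacency graph n = some adj ∧ pvAdjInv n graph adj := by
  obtain ⟨adj, hfold, hinv⟩ := pvAdjFold graph (pvPreShape hpre) [] (adjInit n) (pvAdjInit_inv n)
  exact ⟨adj, hfold, by simpa using hinv⟩

-- ===== A-side: DFS =====
-- reach s → x along a path every vertex of which avoids V
def pvRA (es : List (List Int)) (V : PySem.Set Int) (s x : Int) : Prop :=
  ¬ s ∈ V ∧ Relation.ReflTransGen (fun a b => pvES es a b ∧ ¬ b ∈ V) s x

-- membership in the pushed stack
theorem pvMemFoldlPush (l : List Int) (V : PySem.Set Int) :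
    ∀ (acc : List Int) (x : Int),
    (x ∈ l.foldl (fun st w => if PySem.Set.contains V w then st else w :: st) acc ↔
      (x ∈ l ∧ ¬ x ∈ V) ∨ x ∈ acc) := by
  induction l with
  | nil => simp
  | cons a l ih =>
    intro acc x
    rw [List.foldl_cons]
    by_cases hca : PySem.Set.contains V a = true
    · rw [if_pos hca, ih]
      have haV : a ∈ V := (PySem.Set.contains_iff V a).mp hca
      simp only [List.mem_cons]
      constructor
      · rintro (⟨h1, h2⟩ | h)
        · exact Or.inl ⟨Or.inr h1, h2⟩
        · exact Or.inr h
      · rintro (⟨rfl | h1, h2⟩ | h)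
        · exact absurd haV h2
        · exact Or.inl ⟨h1, h2⟩
        · exact Or.inr h
    · rw [if_neg hca, ih]
      have haV : ¬ a ∈ V := fun h => hca ((PySem.Set.contains_iff V a).mpr h)
      simp only [List.mem_cons]
      constructor
      · rintro (⟨h1, h2⟩ | (rfl | h))
        · exact Or.inl ⟨Or.inr h1, h2⟩
        · exact Or.inl ⟨Or.inl rfl, haV⟩
        · exact Or.inr h
      · rintro (⟨rfl | h1, h2⟩ | h)
        · exact Or.inr (Or.inl rfl)
        · exact Or.inl ⟨h1, h2⟩
        · exact Or.inr (Or.inr h)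

-- split an avoiding walk at its last visit of u
theorem pvRTG_split {es : List (List Int)} {V : PySem.Set Int} {u s x : Int}
    (h : Relation.ReflTransGen (fun a b => pvES es a b ∧ ¬ b ∈ V) s x) :
    Relation.ReflTransGen (fun a b => pvES es a b ∧ ¬ b ∈ PySem.Set.add V u) s x ∨
    Relation.ReflTransGen (fun a b => pvES es a b ∧ ¬ b ∈ PySem.Set.add V u) u x := by
  induction h with
  | refl => exact Or.inl .refl
  | @tail b c _ hbc ih =>
    by_cases hcu : c = u
    · subst hcu; exact Or.inr .refl
    · have hstep : pvES es b c ∧ ¬ c ∈ PySem.Set.add V u :=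
        ⟨hbc.1, fun hmem => by
          rcases (PySem.Set.mem_add V u c).mp hmem with h1 | h1
          · exact hbc.2 h1
          · exact hcu h1⟩
      rcases ih with h' | h'
      · exact Or.inl (h'.tail hstep)
      · exact Or.inr (h'.tail hstep)

theorem pvRA_weaken {es : List (List Int)} {V : PySem.Set Int} {u s x : Int}
    (h : pvRA es (PySem.Set.add V u) s x) : pvRA es V s x := by
  obtain ⟨hs, hrtg⟩ := h
  refine ⟨fun hm => hs ((PySem.Set.mem_add V u s).mpr (Or.inl hm)), ?_⟩
  exact hrtg.mono (fun a b hab => ⟨hab.1, fun hm => hab.2 ((PySem.Set.mem_add V u b).mpr (Or.inl hm))⟩)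

theorem pvRA_head {es : List (List Int)} {V : PySem.Set Int} {u x : Int} (hu : ¬ u ∈ V) :
    pvRA es V u x ↔ x = u ∨ ∃ w, pvES es u w ∧ pvRA es (PySem.Set.add V u) w x := by
  constructor
  · rintro ⟨-, hrtg⟩
    have h2 : Relation.ReflTransGen (fun a b => pvES es a b ∧ ¬ b ∈ PySem.Set.add V u) u x := by
      rcases pvRTG_split (u := u) hrtg with h | h
      · exact h
      · exact h
    rcases Relation.ReflTransGen.cases_head h2 with heq | ⟨w, hw, hrest⟩
    · exact Or.inl heq.symm
    · exact Or.inr ⟨w, hw.1, hw.2, hrest⟩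
  · rintro (rfl | ⟨w, hes, hwmem, hrtg⟩)
    · exact ⟨hu, .refl⟩
    · refine ⟨hu, Relation.ReflTransGen.head
        ⟨hes, fun hm => hwmem ((PySem.Set.mem_add V u w).mpr (Or.inl hm))⟩ ?_⟩
      exact hrtg.mono (fun a b hab =>
        ⟨hab.1, fun hm => hab.2 ((PySem.Set.mem_add V u b).mpr (Or.inl hm))⟩)

theorem pvRA_shift {es : List (List Int)} {V : PySem.Set Int} {u s x : Int} (hu : ¬ u ∈ V)
    (h : pvRA es V s x) : pvRA es (PySem.Set.add V u) s x ∨ pvRA es V u x := by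
  obtain ⟨hs, hrtg⟩ := h
  by_cases hsu : s = u
  · subst hsu; exact Or.inr ⟨hs, hrtg⟩
  · rcases pvRTG_split (u := u) hrtg with h' | h'
    · refine Or.inl ⟨fun hm => ?_, h'⟩
      rcases (PySem.Set.mem_add V u s).mp hm with h1 | h1
      · exact hs h1
      · exact hsu h1
    · refine Or.inr ⟨hu, ?_⟩
      exact h'.mono (fun a b hab =>
        ⟨hab.1, fun hm => hab.2 ((PySem.Set.mem_add V u b).mpr (Or.inl hm))⟩)

theorem pvDfs_spec {graph : List (List Int)} {n : Int} (hpre : Pre_cycle_rank graph n)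
    {adj : PySem.Dict Int (PySem.Set Int)} (hadj : pvAdjInv n graph adj) :
    ∀ (stack : List Int) (visited : PySem.Set Int), (∀ s ∈ stack, pvInR n s) →
    ∃ V', dfsLoop adj stack visited = some V' ∧
      (∀ x, x ∈ V' ↔ x ∈ visited ∨ ∃ s ∈ stack, pvRA graph visited s x) := by
  intro stack visited
  induction stack, visited using dfsLoop.induct (adj := adj) with
  | case1 visited =>
    intro _
    refine ⟨visited, by simp [dfsLoop], fun x => ?_⟩
    simp
  | case2 visited u rest hcont ih =>
    intro hstack
    obtain ⟨V', heq, hchar⟩ := ih (fun s hs => hstack s (List.mem_cons_of_mem _ hs))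
    have huV : u ∈ visited := (PySem.Set.contains_iff visited u).mp hcont
    refine ⟨V', ?_, fun x => ?_⟩
    · rw [dfsLoop]
      rw [if_pos hcont]
      exact heq
    · rw [hchar x]
      constructor
      · rintro (h | ⟨s, hs, hra⟩)
        · exact Or.inl h
        · exact Or.inr ⟨s, List.mem_cons_of_mem _ hs, hra⟩
      · rintro (h | ⟨s, hs, hra⟩)
        · exact Or.inl h
        · rcases List.mem_cons.mp hs with rfl | hs'
          · exact absurd huV hra.1
          · exact Or.inr ⟨s, hs', hra⟩
  | case3 visited u rest hcont hget =>
    intro hstack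
    exfalso
    have : adj.contains u = true := (hadj.1 u).mpr (hstack u (List.mem_cons_self ..))
    rw [PySem.Dict.contains_eq_isSome_get?, hget] at this
    simp at this
  | case4 visited u rest hcont nbrs hget visited' stack' ih =>
    intro hstack
    have huV : ¬ u ∈ visited := fun h => hcont ((PySem.Set.contains_iff visited u).mpr h)
    have hnbrs : ∀ w, w ∈ nbrs ↔ pvES graph u w := by
      intro w
      have : adj.getD u PySem.Set.empty = nbrs := by
        rw [PySem.Dict.getD_eq_get?_getD, hget]; rfl
      rw [← this]
      exact hadj.2 u w
    have hstack' : ∀ s ∈ List.foldl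
        (fun st w => if PySem.Set.contains (PySem.Set.add visited u) w then st else w :: st)
        rest nbrs, pvInR n s := by
      intro s hs
      rcases (pvMemFoldlPush nbrs (PySem.Set.add visited u) rest s).mp hs with ⟨h1, -⟩ | h1
      · exact (pvES_range hpre ((hnbrs s).mp h1)).2
      · exact hstack s (List.mem_cons_of_mem _ h1)
    obtain ⟨V', heq, hchar⟩ := ih hstack'
    refine ⟨V', ?_, fun x => ?_⟩
    · rw [dfsLoop]
      rw [if_neg hcont, hget]
      exact heq
    · rw [hchar x]
      have hmemadd : ∀ y : Int, y ∈ PySem.Set.add visited u ↔ y ∈ visited ∨ y = u :=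
        fun y => PySem.Set.mem_add visited u y
    -- target: x ∈ add visited u ∨ ∃ s ∈ stack', pvRA (add visited u) s x
    --      ↔ x ∈ visited ∨ ∃ s ∈ u :: rest, pvRA visited s x
      constructor
      · rintro (hx | ⟨s, hs, hra⟩)
        · rcases (hmemadd x).mp hx with h | rfl
          · exact Or.inl h
          · exact Or.inr ⟨x, List.mem_cons_self .., ⟨huV, .refl⟩⟩
        · rcases (pvMemFoldlPush nbrs (PySem.Set.add visited u) rest s).mp hs with ⟨h1, -⟩ | h1
          · -- s is an unvisited neighbour of u: route through u
            refine Or.inr ⟨u, List.mem_cons_self .., ?_⟩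
            rw [pvRA_head huV]
            exact Or.inr ⟨s, (hnbrs s).mp h1, hra⟩
          · exact Or.inr ⟨s, List.mem_cons_of_mem _ h1, pvRA_weaken hra⟩
      · rintro (hx | ⟨s, hs, hra⟩)
        · exact Or.inl ((hmemadd x).mpr (Or.inl hx))
        · rcases List.mem_cons.mp hs with rfl | hs'
          · -- s = u: decompose the walk at its first step
            rcases (pvRA_head huV).mp hra with rfl | ⟨w, hes, hwra⟩
            · exact Or.inl ((hmemadd x).mpr (Or.inr rfl))
            · refine Or.inr ⟨w, ?_, hwra⟩
              exact (pvMemFoldlPush nbrs (PySem.Set.add visited s) rest w).mpr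
                (Or.inl ⟨(hnbrs w).mpr hes, hwra.1⟩)
          · rcases pvRA_shift huV hra with h' | h'
            · refine Or.inr ⟨s, ?_, h'⟩
              exact (pvMemFoldlPush nbrs (PySem.Set.add visited u) rest s).mpr (Or.inr hs')
            · rcases (pvRA_head huV).mp h' with rfl | ⟨w, hes, hwra⟩
              · exact Or.inl ((hmemadd x).mpr (Or.inr rfl))
              · refine Or.inr ⟨w, ?_, hwra⟩
                exact (pvMemFoldlPush nbrs (PySem.Set.add visited u) rest w).mpr
                  (Or.inl ⟨(hnbrs w).mpr hes, hwra.1⟩)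

-- when visited is closed under connectivity and does not contain v, the vertices DFS
-- reaches from v avoiding visited are exactly v's component
theorem pvRA_conn {graph : List (List Int)} {V : PySem.Set Int} {v x : Int}
    (hclosed : ∀ y ∈ V, ∀ z, pvConn graph y z → z ∈ V) (hv : ¬ v ∈ V) :
    pvRA graph V v x ↔ pvConn graph v x := by
  constructor
  · rintro ⟨-, hrtg⟩
    exact hrtg.mono (fun a b hab => hab.1)
  · intro hconn
    refine ⟨hv, ?_⟩
    induction hconn with
    | refl => exact .refl
    | @tail b c hvb hbc ih =>
      have hcnot : ¬ c ∈ V := by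
        intro hcV
        exact hv (hclosed c hcV v (pvConn_symm (Relation.ReflTransGen.tail hvb hbc)))
      exact ih.tail ⟨hbc, hcnot⟩

-- ===== A-side: outer loop =====
def pvOInv (graph : List (List Int)) (L : Int → Int) (v : Int)
    (st : PySem.Set Int × Int) : Prop :=
  (∀ x, x ∈ st.1 ↔ ∃ w, 0 ≤ w ∧ w < v ∧ pvConn graph w x) ∧
  st.2 = ((PySem.List.pyRange 0 v 1).countP (pvFirst L) : Int)

theorem pvAFold {graph : List (List Int)} {n : Int} (hpre : Pre_cycle_rank graph n)
    {adj : PySem.Dict Int (PySem.Set Int)} (hadj : pvAdjInv n graph adj)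
    {L : Int → Int}
    (hL : ∀ a b : Int, pvInR n a → pvInR n b → (L a = L b ↔ pvConn graph a b))
    (hn : 0 ≤ n) :
    ∃ st, (PySem.List.pyRange 0 n 1).foldl (visitStep adj) (some (PySem.Set.empty, (0 : Int))) = some st ∧
      pvOInv graph L n st := by
  have haux : ∀ v : Int, 0 ≤ v → v ≤ n →
      ∃ st, (PySem.List.pyRange 0 v 1).foldl (visitStep adj)
          (some (PySem.Set.empty, (0 : Int))) = some st ∧ pvOInv graph L v st := by
    intro v hv
    induction v, hv using Int.le_induction with
    | base =>
      intro _
      refine ⟨(PySem.Set.empty, 0), by rw [PySem.List.pyRange_one_eq_nil (le_refl (0 : Int))]; rfl, ?_, ?_⟩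
      · intro x
        constructor
        · intro h; exact absurd h (by simp [PySem.Set.empty])
        · rintro ⟨w, h1, h2, -⟩; omega
      · rw [PySem.List.pyRange_one_eq_nil (le_refl (0 : Int))]; rfl
    | succ v hv0 ih =>
      intro hv1
      obtain ⟨⟨V, c⟩, hfold, hinv⟩ := ih (by omega)
      obtain ⟨hmemV, hcount⟩ := hinv
      dsimp only at hmemV hcount
      have hvin : pvInR n v := ⟨hv0, by omega⟩
      rw [PySem.List.pyRange_one_succ_right hv0, List.foldl_append, hfold,
        List.foldl_cons, List.foldl_nil]
      by_cases hvV : PySem.Set.contains V v = true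
      · have hvmem : v ∈ V := (PySem.Set.contains_iff V v).mp hvV
        obtain ⟨w0, hw0a, hw0b, hw0c⟩ := (hmemV v).mp hvmem
        refine ⟨(V, c), ?_, ?_, ?_⟩
        · simp only [visitStep]; rw [if_pos hvV]
        · intro x
          constructor
          · intro hx
            obtain ⟨w, h1, h2, h3⟩ := (hmemV x).mp hx
            exact ⟨w, h1, by omega, h3⟩
          · rintro ⟨w, h1, h2, h3⟩
            by_cases hwv : w = v
            · subst hwv
              exact (hmemV x).mpr ⟨w0, hw0a, hw0b, hw0c.trans h3⟩
            · exact (hmemV x).mpr ⟨w, h1, by omega, h3⟩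
        · have hf : pvFirst L v = false := by
            simp only [pvFirst, decide_eq_false_iff_not, not_forall]
            refine ⟨w0, PySem.List.mem_pyRange_one.mpr ⟨hw0a, hw0b⟩,
              not_not.mpr ((hL w0 v ⟨hw0a, by omega⟩ hvin).mpr hw0c)⟩
          dsimp only
          rw [PySem.List.pyRange_one_succ_right hv0, List.countP_append, hcount]
          simp [hf]
      · have hvnot : ¬ v ∈ V := fun h => hvV ((PySem.Set.contains_iff V v).mpr h)
        have hclosed : ∀ y ∈ V, ∀ z, pvConn graph y z → z ∈ V := by
          intro y hy z hyz
          obtain ⟨w, h1, h2, h3⟩ := (hmemV y).mp hy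
          exact (hmemV z).mpr ⟨w, h1, h2, h3.trans hyz⟩
        obtain ⟨V', hdfs, hchar⟩ := pvDfs_spec hpre hadj [v] V
          (by intro s hs; rw [List.mem_singleton] at hs; subst hs; exact hvin)
        have hra : ∀ x, pvRA graph V v x ↔ pvConn graph v x :=
          fun x => pvRA_conn hclosed hvnot
        refine ⟨(V', c + 1), ?_, ?_, ?_⟩
        · simp only [visitStep]; rw [if_neg hvV, hdfs]
        · intro x
          rw [hchar x]
          constructor
          · rintro (hx | ⟨s, hs, hraa⟩)
            · obtain ⟨w, h1, h2, h3⟩ := (hmemV x).mp hx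
              exact ⟨w, h1, by omega, h3⟩
            · rw [List.mem_singleton] at hs; subst hs
              exact ⟨s, hv0, by omega, (hra x).mp hraa⟩
          · rintro ⟨w, h1, h2, h3⟩
            by_cases hwv : w = v
            · subst hwv
              exact Or.inr ⟨w, List.mem_singleton.mpr rfl, (hra x).mpr h3⟩
            · exact Or.inl ((hmemV x).mpr ⟨w, h1, by omega, h3⟩)
        · have hf : pvFirst L v = true := by
            simp only [pvFirst, decide_eq_true_eq]
            intro w hw hlv
            rcases PySem.List.mem_pyRange_one.mp hw with ⟨h1, h2⟩
            have hconn : pvConn graph w v := (hL w v ⟨h1, by omega⟩ hvin).mp hlv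
            exact hvnot ((hmemV v).mpr ⟨w, h1, h2, hconn⟩)
          dsimp only
          rw [PySem.List.pyRange_one_succ_right hv0, List.countP_append, hcount]
          simp [hf]
  exact haux n hn (le_refl n)

-- ===== VERDICT (by name: the statement is the Claim_ definition above) =====
theorem cycle_rank_spec : Claim_equal_cycle_rank := by
  unfold Claim_equal_cycle_rank
  intro graph n _ hpre
  unfold Spec_cycle_rank
  by_cases hn : 0 ≤ n
  · obtain ⟨⟨labelF, cB⟩, hBfold, hkeysF, hcF, hcompF⟩ :=
      pvBFold graph (pvPreShape hpre) []
        (labelInit n, (PySem.Dict.size (labelInit n) : Int)) (pvBInv_init n)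
    dsimp only at hkeysF hcF hcompF
    rw [List.nil_append] at hcF
    obtain ⟨adj, hadjeq, hadjinv⟩ := pvAdjacency hpre
    set L : Int → Int := fun a => labelF.getD a 0 with hLdef
    obtain ⟨⟨VF, cA⟩, hAfold, hmemF, hcountA⟩ := pvAFold hpre hadjinv (L := L) hcF hn
    dsimp only at hcountA
    unfold cycle_rank
    rw [hadjeq]
    dsimp only
    rw [hAfold]
    dsimp only
    unfold cycle_rank_alt
    rw [hBfold]
    dsimp only
    rw [pvDedupCount L n hn] at hcompF
    rw [hcountA, hcompF]
  · have hnil : graph = [] := by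
      cases graph with
      | nil => rfl
      | cons e rest =>
        obtain ⟨u, v, rfl, hu, hv⟩ := pvPreShape hpre _ (List.mem_cons_self ..)
        exfalso
        have h1 := hu.1
        have h2 := hu.2
        omega
    subst hnil
    have hr : PySem.List.pyRange 0 n 1 = [] := PySem.List.pyRange_one_eq_nil (by omega)
    simp [cycle_rank, cycle_rank_alt, adjacency, labelInit, adjInit, hr,
      PySem.Dict.size, PySem.Dict.empty]
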